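-- pv_equiv track=rewrite | github.com/sgeektn/sqlBot | recursiveSearch.py | check_ext
-- ===== SOURCE A (Python) =====
-- def check_ext(url):#
-- 	banned_exts = [".jpg", ".jpeg", ".png", ".pdf", ");", ".js"]
-- 	for banned_ext in banned_exts:
-- 		if url.find(banned_ext + "?") != -1:
--
-- 			return False
-- 		elif url[len(url) - len(banned_ext):] == banned_ext:
--
-- 			return False
-- 	return True
-- ===== SOURCE B (Python) =====
-- def check_ext(url):
--     banned_exts = [".jpg", ".jpeg", ".png", ".pdf", ");", ".js"]
--     for i in range(len(url)):
--         for ext in banned_exts: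
--             j = i + len(ext)
--             if url[i:j] == ext and (j == len(url) or url[j] == "?"):
--                 return False
--     return True
-- ===== Notes on version B (the rewrite author's own statement) =====
-- stated objective: alternative
-- what changed: Replaces A's per-extension loop of substring search for ext plus query-separator and an end-slice comparison with a single left-to-right scan over all start positions of the url, matching each banned extension in place followed by a question mark or the end of the string.
import Mathlib
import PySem

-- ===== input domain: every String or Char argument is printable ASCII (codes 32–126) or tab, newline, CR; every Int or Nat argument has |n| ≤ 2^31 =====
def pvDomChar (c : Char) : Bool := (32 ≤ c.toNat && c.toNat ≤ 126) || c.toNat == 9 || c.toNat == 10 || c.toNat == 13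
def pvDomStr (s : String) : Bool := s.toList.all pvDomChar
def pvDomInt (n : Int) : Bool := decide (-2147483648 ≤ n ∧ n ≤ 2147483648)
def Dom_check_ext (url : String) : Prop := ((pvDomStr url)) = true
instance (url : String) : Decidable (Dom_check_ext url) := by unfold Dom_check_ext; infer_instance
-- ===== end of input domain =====

-- B replaces A's per-extension substring search plus suffix slice with one left-to-right
-- scan over positions, matching each banned extension followed by a question mark or the end of the string
-- in place (objective: alternative; same exact results).

-- ===== PORT A =====
def bannedExtsA : List String := [".jpg", ".jpeg", ".png", ".pdf", ");", ".js"]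

def loopA (url : String) : List String → Bool
  | [] => true
  | e :: rest =>
    if PySem.Str.find url (e ++ "?") ≠ -1 then false
    else if PySem.Str.slice url (some (PySem.Str.len url - PySem.Str.len e)) none = e then false
    else loopA url rest

def check_ext (url : String) : Bool := loopA url bannedExtsA

-- ===== PORT B =====
def bannedExtsB : List (List Char) :=
  [".jpg".toList, ".jpeg".toList, ".png".toList, ".pdf".toList, ");".toList, ".js".toList]

-- url[i:j] == ext and (j == len(url) or url[j] == "?"), with t = the tail of url at i
def matchAtB (t e : List Char) : Bool :=
  e.isPrefixOf t &&
    (match t.drop e.length with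
     | [] => true
     | '?' :: _ => true
     | _ => false)

-- the 'for i in range(len(url))' loop, walking the tails of the string
def scanB : List Char → Bool
  | [] => true
  | t@(_ :: rest) => if bannedExtsB.any (matchAtB t) then false else scanB rest

def check_ext_alt (url : String) : Bool := scanB url.toList

-- ===== PRECONDITION & SPEC =====
def Spec_check_ext (url : String) (out : Bool) : Prop := out = check_ext_alt url
instance (url : String) (out : Bool) : Decidable (Spec_check_ext url out) := by unfold Spec_check_ext; infer_instance

-- ===== CLAIM (what is proved, stated in full; the proofs are below) =====
def Claim_equal_check_ext : Prop := ∀ (url : String), Dom_check_ext url → Spec_check_ext url (check_ext url)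

-- ===== LEMMAS AND PROOFS =====

-- A banned extension e "hits" L: e followed by '?' occurs in L, or e sits at L's end
def HitP (e L : List Char) : Prop := (e ++ ['?']) <:+: L ∨ L.drop (L.length - e.length) = e

theorem findA_iff (url e : String) :
    PySem.Str.find url (e ++ "?") ≠ -1 ↔ (e.toList ++ ['?']) <:+: url.toList := by
  rw [PySem.Str.find_ne_neg_one_iff]
  have h : (e ++ "?").toList = e.toList ++ ['?'] := by
    rw [String.toList_append]; rfl
  rw [h]

theorem sliceA_iff (url e : String) :
    PySem.Str.slice url (some (PySem.Str.len url - PySem.Str.len e)) none = e ↔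
    url.toList.drop (url.toList.length - e.toList.length) = e.toList := by
  rw [← String.toList_inj, PySem.Str.toList_slice, PySem.Chars.slice_eq_listSlice,
      PySem.List.slice_some_none, PySem.Str.len_eq, PySem.Str.len_eq]
  set L := url.toList
  set E := e.toList
  by_cases hk : E.length ≤ L.length
  · have : (L.length : Int) - (E.length : Int) = ((L.length - E.length : Nat) : Int) := by
      omega
    rw [this, PySem.List.clampIdx_natCast]
    have : min (L.length - E.length) L.length = L.length - E.length := by omega
    rw [this]
  · have hpos : 0 < E.length - L.length := by omega
    have : (L.length : Int) - (E.length : Int) = -((E.length - L.length : Nat) : Int) := by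
      omega
    rw [this, PySem.List.clampIdx_neg_natCast _ _ hpos]
    constructor
    · intro h
      have := congrArg List.length h
      simp [List.length_drop] at this
      omega
    · intro h
      have := congrArg List.length h
      simp [List.length_drop] at this
      omega

theorem loopA_true_iff (url : String) (l : List String) :
    loopA url l = true ↔ ∀ e ∈ l, ¬ HitP e.toList url.toList := by
  induction l with
  | nil => simp [loopA]
  | cons e rest ih =>
    by_cases h1 : PySem.Str.find url (e ++ "?") ≠ -1
    · simp only [loopA, if_pos h1]
      constructor
      · intro h; exact absurd h (by simp)
      · intro h
        exact absurd (Or.inl ((findA_iff url e).mp h1)) (h e (List.mem_cons_self ..))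
    · by_cases h2 : PySem.Str.slice url (some (PySem.Str.len url - PySem.Str.len e)) none = e
      · simp only [loopA, if_neg h1, if_pos h2]
        constructor
        · intro h; exact absurd h (by simp)
        · intro h
          exact absurd (Or.inr ((sliceA_iff url e).mp h2)) (h e (List.mem_cons_self ..))
      · simp only [loopA, if_neg h1, if_neg h2, ih, List.forall_mem_cons]
        have hne : ¬ HitP e.toList url.toList := by
          rintro (hinf | hdrop)
          · exact h1 ((findA_iff url e).mpr hinf)
          · exact h2 ((sliceA_iff url e).mpr hdrop)
        tauto

theorem matchAtB_nil {e : List Char} (he : e ≠ []) : matchAtB [] e = false := by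
  cases e with
  | nil => exact absurd rfl he
  | cons c cs => simp [matchAtB, List.isPrefixOf]

theorem scanB_true_iff (L : List Char) :
    scanB L = true ↔ ∀ e ∈ bannedExtsB, ∀ j, matchAtB (L.drop j) e = false := by
  have hne : ∀ e ∈ bannedExtsB, e ≠ [] := by decide
  induction L with
  | nil =>
    simp only [scanB, true_iff]
    intro e he j
    rw [List.drop_nil]
    exact matchAtB_nil (hne e he)
  | cons c rest ih =>
    by_cases hs : bannedExtsB.any (matchAtB (c :: rest)) = true
    · simp only [scanB, if_pos hs]
      obtain ⟨e, he, hm⟩ := List.any_eq_true.mp hs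
      constructor
      · intro h; exact absurd h (by simp)
      · intro h
        have := h e he 0
        rw [List.drop_zero] at this
        rw [hm] at this; exact absurd this (by simp)
    · simp only [scanB, if_neg hs, ih]
      have hall := List.any_eq_false.mp (Bool.not_eq_true _ ▸ hs)
      constructor
      · intro h e he j
        cases j with
        | zero =>
          rw [List.drop_zero]
          exact Bool.not_eq_true _ ▸ (hall e he)
        | succ j => exact h e he j
      · intro h e he j
        have := h e he (j + 1)
        simpa using this


theorem exists_match_iff (e L : List Char) (he : e ≠ []) :
    (∃ j, matchAtB (L.drop j) e = true) ↔ HitP e L := by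
  constructor
  · rintro ⟨j, hj⟩
    unfold matchAtB at hj
    rw [Bool.and_eq_true] at hj
    obtain ⟨hpre, hrest⟩ := hj
    have hpre' : e <+: L.drop j := List.isPrefixOf_iff_prefix.mp hpre
    have heq : e ++ (L.drop j).drop e.length = L.drop j := List.prefix_iff_eq_append.mp hpre'
    have hjlt : j < L.length := by
      by_contra hge
      have : L.drop j = [] := List.drop_eq_nil_of_le (by omega)
      rw [this] at hpre'
      exact he (List.prefix_nil.mp hpre')
    cases hu : (L.drop j).drop e.length with
    | nil =>
      right
      have hLj : L.drop j = e := by rw [← heq, hu, List.append_nil]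
      have hlen : L.length - j = e.length := by
        have := congrArg List.length hLj; simpa [List.length_drop] using this
      have : L.length - e.length = j := by omega
      rw [this]; exact hLj
    | cons c v =>
      have hc : c = '?' := by
        rw [hu] at hrest
        split at hrest <;> simp_all
      left
      have : (e ++ ['?']) <+: L.drop j := by
        refine ⟨v, ?_⟩
        rw [List.append_assoc]
        rw [hu, hc] at heq
        exact heq
      exact this.isInfix.trans (List.drop_suffix j L).isInfix
  · rintro (hinf | hdrop)
    · obtain ⟨j, hj⟩ := (PySem.Chars.exists_prefix_drop_iff_isIn (e ++ ['?']) L).mpr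
        ((PySem.Chars.isIn_iff_infix _ _).mpr hinf)
      refine ⟨j, ?_⟩
      obtain ⟨v, hv⟩ := hj
      unfold matchAtB
      rw [Bool.and_eq_true]
      constructor
      · exact List.isPrefixOf_iff_prefix.mpr ⟨'?' :: v, by rw [← hv, List.append_assoc]; rfl⟩
      · have : (L.drop j).drop e.length = '?' :: v := by
          rw [← hv, List.append_assoc]
          simp
        rw [this]
        rfl
    · refine ⟨L.length - e.length, ?_⟩
      rw [hdrop]
      unfold matchAtB
      rw [Bool.and_eq_true]
      exact ⟨List.isPrefixOf_iff_prefix.mpr (List.prefix_refl e), by simp⟩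

theorem no_match_iff (e L : List Char) (he : e ≠ []) :
    (∀ j, matchAtB (L.drop j) e = false) ↔ ¬ HitP e L := by
  rw [← exists_match_iff e L he]
  constructor
  · rintro h ⟨j, hj⟩; rw [h j] at hj; cases hj
  · intro h j
    by_contra hb
    rw [Bool.not_eq_false] at hb
    exact h ⟨j, hb⟩

-- ===== VERDICT (by name: the statement is the Claim_ definition above) =====
theorem check_ext_spec : Claim_equal_check_ext := by
  intro url _
  unfold Spec_check_ext check_ext check_ext_alt
  rw [Bool.eq_iff_iff, loopA_true_iff, scanB_true_iff]
  simp only [bannedExtsA, bannedExtsB, List.forall_mem_cons, List.not_mem_nil, and_true,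
    false_implies, implies_true]
  rw [no_match_iff _ _ (by decide), no_match_iff _ _ (by decide), no_match_iff _ _ (by decide),
      no_match_iff _ _ (by decide), no_match_iff _ _ (by decide), no_match_iff _ _ (by decide)]
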